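-- pv_equiv track=rewrite | github.com/agroy1/CS121Project2 | scraper.py | sentence_repetition
-- ===== SOURCE A (Python) =====
-- def sentence_repetition(sentences, limit=5):
--     seen = {}
--     for sent in sentences:
--         if len(sent) > 30:
--             seen[sent] = seen.get(sent, 0) + 1
--             if seen[sent] >= limit:
--                 return False
--     return True
-- ===== SOURCE B (Python) =====
-- def sentence_repetition(sentences, limit=5):
--     longs = sorted(s for s in sentences if len(s) > 30)
--     run = 0
--     prev = None
--     for s in longs:
--         run = run + 1 if s == prev else 1
--         if run >= limit:
--             return False
--         prev = s
--     return True
-- ===== Notes on version B (the rewrite author's own statement) =====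
-- stated objective: alternative
-- what changed: A's single pass with a running dict of counts and an in-loop early return is replaced by sort-then-scan: sort the long sentences so equal ones become adjacent, then one scan tracking the current run length of adjacent equal strings, failing when a run reaches the limit; no per-sentence counting structure exists at all.
import Mathlib
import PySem

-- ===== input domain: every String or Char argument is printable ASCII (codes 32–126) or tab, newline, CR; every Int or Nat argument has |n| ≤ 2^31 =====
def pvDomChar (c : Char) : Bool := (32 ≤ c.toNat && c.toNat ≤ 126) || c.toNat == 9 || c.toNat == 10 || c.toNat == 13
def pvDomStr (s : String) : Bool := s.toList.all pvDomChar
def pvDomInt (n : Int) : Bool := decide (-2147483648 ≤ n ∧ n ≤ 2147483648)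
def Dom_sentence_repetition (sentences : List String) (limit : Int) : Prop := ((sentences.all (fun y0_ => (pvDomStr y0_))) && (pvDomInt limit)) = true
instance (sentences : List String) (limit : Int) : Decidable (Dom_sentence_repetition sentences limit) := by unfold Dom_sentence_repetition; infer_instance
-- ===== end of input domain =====

-- B replaces A's dict-counting loop by a different algorithm: sort the long sentences so equal
-- ones become adjacent, then scan once for a run of length ≥ limit (objective: alternative).

-- ===== PORT A =====
-- the 'for sent in sentences' loop with the running dict 'seen' and the early 'return False'
def srLoop (sentences : List String) (seen : PySem.Dict String Int) (limit : Int) : Bool :=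
  match sentences with
  | [] => true
  | sent :: rest =>
    if PySem.Str.len sent > 30 then
      let seen' := seen.insert sent (seen.getD sent 0 + 1)
      if seen'.getD sent 0 ≥ limit then false
      else srLoop rest seen' limit
    else srLoop rest seen limit

def sentence_repetition (sentences : List String) (limit : Int) : Bool :=
  srLoop sentences PySem.Dict.empty limit

-- ===== PORT B =====
-- the 'for s in longs' run-length scan over the sorted list, with the early 'return False'
def srAltLoop (l : List String) (run : Int) (prev : Option String) (limit : Int) : Bool :=
  match l with
  | [] => true
  | s :: rest =>
    let run' := if prev = some s then run + 1 else 1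
    if run' ≥ limit then false
    else srAltLoop rest run' (some s) limit

def sentence_repetition_alt (sentences : List String) (limit : Int) : Bool :=
  let longs := sentences.filter (fun s => decide (PySem.Str.len s > 30))
  srAltLoop (PySem.List.sorted longs (fun x => x) false) 0 none limit

-- ===== PRECONDITION & SPEC =====
def Spec_sentence_repetition (sentences : List String) (limit : Int) (out : Bool) : Prop := out = sentence_repetition_alt sentences limit
instance (sentences : List String) (limit : Int) (out : Bool) : Decidable (Spec_sentence_repetition sentences limit out) := by unfold Spec_sentence_repetition; infer_instance

-- ===== CLAIM (what is proved, stated in full; the proofs are below) =====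
def Claim_equal_sentence_repetition : Prop := ∀ (sentences : List String) (limit : Int), Dom_sentence_repetition sentences limit → Spec_sentence_repetition sentences limit (sentence_repetition sentences limit)

-- ===== LEMMAS AND PROOFS =====

-- A's loop, on any remaining input and any accumulated dict, returns true iff every long sentence
-- of the remaining input keeps its (accumulated + remaining) count below the limit.
theorem srLoop_eq (limit : Int) : ∀ (ss : List String) (seen : PySem.Dict String Int),
    srLoop ss seen limit =
      (ss.filter (fun s => decide (PySem.Str.len s > 30))).all
        (fun s => decide (seen.getD s 0 +
          (((ss.filter (fun s => decide (PySem.Str.len s > 30))).count s : Int)) < limit)) := by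
  intro ss
  induction ss with
  | nil => intro seen; simp [srLoop]
  | cons sent rest ih =>
    intro seen
    by_cases hl : PySem.Str.len sent > 30
    · simp only [srLoop, if_pos hl, List.filter_cons, decide_eq_true hl, ite_true]
      rw [PySem.Dict.getD_insert_self]
      set F := rest.filter (fun s => decide (PySem.Str.len s > 30)) with hF
      by_cases hc : seen.getD sent 0 + 1 ≥ limit
      · rw [if_pos hc]
        symm
        refine List.all_eq_false.mpr ⟨sent, List.mem_cons_self, ?_⟩
        rw [List.count_cons_self]
        simp only [decide_eq_true_eq]
        push_cast
        omega
      · rw [if_neg hc, ih]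
        have hbody : ∀ s : String,
            (decide ((seen.insert sent (seen.getD sent 0 + 1)).getD s 0 + (F.count s : Int) < limit))
              = (decide (seen.getD s 0 + (((sent :: F).count s : Nat) : Int) < limit)) := by
          intro s
          rw [PySem.Dict.getD_insert]
          by_cases hs : s = sent
          · subst hs
            rw [List.count_cons_self, if_pos rfl]
            push_cast
            congr 1
            simp only [eq_iff_iff]
            omega
          · rw [if_neg hs]
            simp [Ne.symm hs]
        rw [List.all_congr rfl hbody]
        -- the extra head conjunct on the right is redundant (sent ∈ F) or trivially true (sent ∉ F)
        simp only [List.all_cons]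
        by_cases hmem : sent ∈ F
        · cases hall : F.all (fun s => decide (seen.getD s 0 + (((sent :: F).count s : Nat) : Int) < limit)) with
          | false => simp
          | true =>
            have := (List.all_eq_true.mp hall) sent hmem
            simp_all
        · have : F.count sent = 0 := List.count_eq_zero.mpr hmem
          simp [List.count_cons_self, this, show seen.getD sent 0 + 1 < limit by omega]
    · simp only [srLoop, if_neg hl, List.filter_cons, decide_eq_false hl]
      simp [ih]

-- counting an element distinct from the head skips the head
theorem cntNe {a b : String} (l : List String) (h : a ≠ b) :
    List.count a (b :: l) = List.count a l := by
  simp [Ne.symm h]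

-- B's run-length scan on a sorted tail: with prev = some s, run r < limit already consumed, and
-- every remaining element ≥ s, the scan succeeds iff s's total stays below limit and every other
-- remaining value's count does too.
theorem srAltLoop_some (limit : Int) : ∀ (l : List String) (s : String) (r : Int),
    l.Pairwise (· ≤ ·) → (∀ x ∈ l, s ≤ x) → r < limit →
    (srAltLoop l r (some s) limit = true ↔
      (r + (l.count s : Int) < limit ∧ ∀ t ∈ l, t ≠ s → (l.count t : Int) < limit)) := by
  intro l
  induction l with
  | nil =>
    intro s r _ _ hr
    simp [srAltLoop]
    omega
  | cons t rest ih =>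
    intro s r hpw hge hr
    have hpwrest := (List.pairwise_cons.mp hpw).2
    have htle := (List.pairwise_cons.mp hpw).1
    by_cases hts : t = s
    · subst hts
      simp only [srAltLoop, if_true]
      by_cases hc : r + 1 ≥ limit
      · rw [if_pos hc]
        constructor
        · intro h; exact absurd h (by simp)
        · rintro ⟨h1, _⟩
          rw [List.count_cons_self] at h1
          push_cast at h1
          omega
      · rw [if_neg hc]
        rw [ih t (r + 1) hpwrest htle (by omega)]
        constructor
        · rintro ⟨h1, h2⟩
          refine ⟨?_, ?_⟩
          · rw [List.count_cons_self]; push_cast; omega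
          · intro u hu hus
            rcases List.mem_cons.mp hu with h | h
            · exact absurd h hus
            · rw [cntNe _ hus]; exact h2 u h hus
        · rintro ⟨h1, h2⟩
          refine ⟨?_, ?_⟩
          · rw [List.count_cons_self] at h1; push_cast at h1; omega
          · intro u hu hus
            have := h2 u (List.mem_cons_of_mem _ hu) hus
            rwa [cntNe _ hus] at this
    · -- t ≠ s : nothing equal to s remains (antisymmetry), run restarts at 1
      have hst : s ≤ t := hge t List.mem_cons_self
      have hnos : ∀ u ∈ t :: rest, u ≠ s := by
        intro u hu he
        subst he
        rcases List.mem_cons.mp hu with h | h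
        · exact hts h.symm
        · exact hts (le_antisymm (htle u h) hst)
      have hcs : (t :: rest).count s = 0 :=
        List.count_eq_zero.mpr (fun hm => (hnos s hm) rfl)
      have hst' : s ≠ t := fun h => hts h.symm
      have hcond : ¬ ((some s : Option String) = some t) := by simp [hst']
      simp only [srAltLoop, if_neg hcond]
      by_cases hc : (1 : Int) ≥ limit
      · rw [if_pos hc]
        constructor
        · intro h; exact absurd h (by simp)
        · rintro ⟨_, h2⟩
          have := h2 t List.mem_cons_self hts
          rw [List.count_cons_self] at this
          push_cast at this
          omega
      · rw [if_neg hc]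
        rw [ih t 1 hpwrest htle (by omega)]
        constructor
        · rintro ⟨h1, h2⟩
          refine ⟨by rw [hcs]; push_cast; omega, ?_⟩
          intro u hu hus
          rcases List.mem_cons.mp hu with h | h
          · subst h; rw [List.count_cons_self]; push_cast; omega
          · by_cases hut : u = t
            · subst hut; rw [List.count_cons_self]; push_cast; omega
            · rw [cntNe _ hut]; exact h2 u h hut
        · rintro ⟨_, h2⟩
          have h2t := h2 t List.mem_cons_self hts
          rw [List.count_cons_self] at h2t
          push_cast at h2t
          refine ⟨by omega, ?_⟩
          intro u hu hut
          have := h2 u (List.mem_cons_of_mem _ hu) (hnos u (List.mem_cons_of_mem _ hu))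
          rwa [cntNe _ hut] at this

-- B's scan over any sorted list equals the frequency criterion on that list.
theorem srAltLoop_sorted (limit : Int) (l : List String) (hpw : l.Pairwise (· ≤ ·)) :
    (srAltLoop l 0 none limit = true ↔ ∀ t ∈ l, (l.count t : Int) < limit) := by
  cases l with
  | nil => simp [srAltLoop]
  | cons s rest =>
    have hpwrest := (List.pairwise_cons.mp hpw).2
    have htle := (List.pairwise_cons.mp hpw).1
    have hcond : ¬ ((none : Option String) = some s) := by simp
    simp only [srAltLoop, if_neg hcond]
    by_cases hc : (1 : Int) ≥ limit
    · rw [if_pos hc]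
      constructor
      · intro h; exact absurd h (by simp)
      · intro h2
        have := h2 s List.mem_cons_self
        rw [List.count_cons_self] at this
        push_cast at this
        omega
    · rw [if_neg hc]
      rw [srAltLoop_some limit rest s 1 hpwrest htle (by omega)]
      constructor
      · rintro ⟨h1, h2⟩
        intro u hu
        rcases List.mem_cons.mp hu with h | h
        · subst h; rw [List.count_cons_self]; push_cast; omega
        · by_cases hus : u = s
          · subst hus; rw [List.count_cons_self]; push_cast; omega
          · rw [cntNe _ hus]; exact h2 u h hus
      · intro h2
        have hs := h2 s List.mem_cons_self
        rw [List.count_cons_self] at hs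
        push_cast at hs
        refine ⟨by omega, ?_⟩
        intro u hu hus
        have := h2 u (List.mem_cons_of_mem _ hu)
        rwa [cntNe _ hus] at this

-- ===== VERDICT (by name: the statement is the Claim_ definition above) =====
theorem sentence_repetition_spec : Claim_equal_sentence_repetition := by
  intro sentences limit _
  unfold Spec_sentence_repetition sentence_repetition sentence_repetition_alt
  rw [srLoop_eq]
  set longs := sentences.filter (fun s => decide (PySem.Str.len s > 30)) with hlongs
  set L := PySem.List.sorted longs (fun x => x) false with hL
  have hperm : L.Perm longs := PySem.List.sorted_perm longs (fun x => x) false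
  have hpw : L.Pairwise (· ≤ ·) := PySem.List.sorted_pairwise longs (fun x => x)
  have hA : (longs.all (fun s => decide ((PySem.Dict.empty : PySem.Dict String Int).getD s 0 + (longs.count s : Int) < limit)) = true)
      ↔ ∀ t ∈ L, (L.count t : Int) < limit := by
    rw [List.all_eq_true]
    constructor
    · intro h t ht
      have := h t (hperm.mem_iff.mp ht)
      simp only [PySem.Dict.getD_empty, zero_add, decide_eq_true_eq] at this
      rwa [hperm.count_eq]
    · intro h t ht
      have := h t (hperm.mem_iff.mpr ht)
      rw [hperm.count_eq] at this
      simp only [PySem.Dict.getD_empty, zero_add, decide_eq_true_eq]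
      exact this
  have hB := srAltLoop_sorted limit L hpw
  rcases hval : srAltLoop L 0 none limit with _ | _
  · rcases hAv : longs.all (fun s => decide ((PySem.Dict.empty : PySem.Dict String Int).getD s 0 + (longs.count s : Int) < limit)) with _ | _
    · rfl
    · exact absurd (hB.mpr (hA.mp hAv)) (by simp [hval])
  · exact hA.mpr (hB.mp hval)
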